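-- pv_equiv track=rewrite | github.com/zero0205/Algorithm_Python | 카카오 기출/2022 KAKAO BLIND RECRUITMENT/신고 결과 받기.py | solution
-- ===== SOURCE A (Python) =====
-- from collections import defaultdict
--
-- def solution(id_list, report, k):
--     answer = []
--     report_dict = defaultdict(set)  # value의 기본 자료형을 set으로 해줌
--     # 각 유저별로 신고한 id를 set 이용하여 정리
--     for r in report:
--         a, b = r.split()    # a: 이용자id, b: 신고한id
--         report_dict[b].add(a)
--
--     report_num = defaultdict(int)
--     # k명 이상에게 신고당했다면 신고한 id들의 처리 결과 메일 수신 횟수 1 증가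
--     for a, b in report_dict.items():
--         if len(b) >= k:
--             for id in b:
--                 report_num[id] += 1
--     for id in id_list:
--         answer.append(report_num[id])
--     return answer
-- ===== SOURCE B (Python) =====
-- def solution(id_list, report, k):
--     pairs = set()
--     for r in report:
--         a, b = r.split()
--         pairs.add((a, b))
--     received = {}
--     for a, b in pairs:
--         received[b] = received.get(b, 0) + 1
--     suspended = {b for b, c in received.items() if c >= k}
--     targets = {}
--     for a, b in pairs:
--         targets.setdefault(a, set()).add(b)
--     return [sum(1 for b in targets.get(i, set()) if b in suspended) for i in id_list]
-- ===== Notes on version B (the rewrite author's own statement) =====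
-- stated objective: alternative
-- what changed: B dedupes report into a set of (reporter, reported) pairs, builds a distinct-report counter and a suspended-user set from it, plus a reporter->targets map, and answers each id by counting its targets inside the suspended set, whereas A groups reporter-sets per reported user and accumulates a per-reporter mail counter over every qualifying group.
import Mathlib
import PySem

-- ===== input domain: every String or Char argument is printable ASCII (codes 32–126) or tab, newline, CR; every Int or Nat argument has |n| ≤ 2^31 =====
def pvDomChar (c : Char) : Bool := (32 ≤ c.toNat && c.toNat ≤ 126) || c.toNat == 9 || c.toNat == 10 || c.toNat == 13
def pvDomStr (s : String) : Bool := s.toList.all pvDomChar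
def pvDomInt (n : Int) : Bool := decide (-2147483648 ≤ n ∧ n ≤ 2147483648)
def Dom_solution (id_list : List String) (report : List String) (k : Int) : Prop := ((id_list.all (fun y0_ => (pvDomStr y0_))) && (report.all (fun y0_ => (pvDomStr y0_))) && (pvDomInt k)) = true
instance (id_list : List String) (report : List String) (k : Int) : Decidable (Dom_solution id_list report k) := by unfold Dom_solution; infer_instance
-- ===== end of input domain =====

-- B re-implements A by a different decomposition: dedupe report into a set of pairs, build a
-- suspended set from distinct-report counts, then answer per user by counting their reported
-- targets that are suspended (A instead groups reporters per reported user and accumulates a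
-- mail counter over each qualifying group). Objective: alternative; equal return values.

-- ===== PORT A =====
def solution (id_list : List String) (report : List String) (k : Int) : List Int :=
  let report_dict : PySem.Dict String (PySem.Set String) :=
    report.foldl (fun d r =>
      match PySem.Str.split₀ r with
      | [a, b] => d.insert b (PySem.Set.add (d.getD b PySem.Set.empty) a)
      | _ => d) PySem.Dict.empty
  let report_num : PySem.Dict String Int :=
    report_dict.items.foldl (fun d p =>
      if k ≤ (p.2.length : Int) then
        p.2.foldl (fun d i => d.modify i 0 (· + 1)) d
      else d) PySem.Dict.empty
  id_list.foldl (fun answer i => answer ++ [report_num.getD i 0]) []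

-- ===== PORT B =====
-- 'a, b = r.split()' for a two-word report line (exact on Pre_, where split() yields 2 words)
def pvParse2 (r : String) : String × String :=
  let ws := PySem.Str.split₀ r
  (ws.getD 0 "", ws.getD 1 "")

def solution_alt (id_list : List String) (report : List String) (k : Int) : List Int :=
  let pairs : PySem.Set (String × String) :=
    report.foldl (fun s r => PySem.Set.add s (pvParse2 r)) PySem.Set.empty
  let received : PySem.Dict String Int :=
    pairs.foldl (fun d p => d.insert p.2 (d.getD p.2 0 + 1)) PySem.Dict.empty
  let suspended : PySem.Set String :=
    PySem.Set.ofList ((received.items.filter (fun p => k ≤ p.2)).map (fun p => p.1))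
  let targets : PySem.Dict String (PySem.Set String) :=
    pairs.foldl (fun d p => d.insert p.1 (PySem.Set.add (d.getD p.1 PySem.Set.empty) p.2)) PySem.Dict.empty
  id_list.map (fun i =>
    (((targets.getD i PySem.Set.empty).filter (fun b => PySem.Set.contains suspended b)).length : Int))

-- ===== PRECONDITION & SPEC =====
-- Pre_ excludes exactly the inputs on which A raises: a report entry whose split() does not
-- yield exactly two whitespace-separated words makes 'a, b = r.split()' raise ValueError.
def Pre_solution (id_list : List String) (report : List String) (k : Int) : Prop :=
  ∀ r ∈ report, (PySem.Str.split₀ r).length = 2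
instance (id_list : List String) (report : List String) (k : Int) : Decidable (Pre_solution id_list report k) := by unfold Pre_solution; infer_instance

def pvWitness_solution : List String × List String × Int :=
  (["muzi", "frodo", "apeach", "neo"], ["muzi frodo", "apeach frodo", "frodo neo", "muzi neo", "apeach muzi"], 2)

def Spec_solution (id_list : List String) (report : List String) (k : Int) (out : List Int) : Prop := out = solution_alt id_list report k
instance (id_list : List String) (report : List String) (k : Int) (out : List Int) : Decidable (Spec_solution id_list report k out) := by unfold Spec_solution; infer_instance

-- ===== CLAIM (what is proved, stated in full; the proofs are below) =====
def Claim_equal_solution : Prop := ∀ (id_list : List String) (report : List String) (k : Int), Dom_solution id_list report k → Pre_solution id_list report k → Spec_solution id_list report k (solution id_list report k)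


-- ===== LEMMAS AND PROOFS =====
-- L1: convert a fold that pattern-matches on split₀ into a fold over the parsed pair list
theorem pvFoldlMatchSplit {β : Type} (report : List String)
    (h : ∀ r ∈ report, (PySem.Str.split₀ r).length = 2)
    (F : β → String × String → β) (init : β) :
    report.foldl (fun acc r =>
      match PySem.Str.split₀ r with
      | [a, b] => F acc (a, b)
      | _ => acc) init
    = (report.map (fun r => ((PySem.Str.split₀ r).getD 0 "", (PySem.Str.split₀ r).getD 1 ""))).foldl F init := by
  rw [List.foldl_map]
  apply PySem.List.foldl_congr_mem
  intro acc r hr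
  obtain ⟨a, b, hab⟩ := List.length_eq_two.mp (h r hr)
  simp [hab]


theorem pvGetDGroup (key val : String × String → String) (L : List (String × String))
    (d : PySem.Dict String (PySem.Set String)) (b : String) :
    (L.foldl (fun d p => d.insert (key p) (PySem.Set.add (d.getD (key p) PySem.Set.empty) (val p))) d).getD b PySem.Set.empty
    = PySem.Set.update (d.getD b PySem.Set.empty) ((L.filter (fun p => key p == b)).map val) := by
  induction L generalizing d with
  | nil => simp [PySem.Set.update]
  | cons p L ih =>
    simp only [List.foldl_cons, ih]
    by_cases hb : key p = b
    · simp [hb, PySem.Dict.getD_insert_self, PySem.Set.update_cons]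
    · rw [PySem.Dict.getD_insert_of_ne _ _ _ (Ne.symm hb)]
      simp [hb]

theorem pvCountPEq {α : Type} [DecidableEq α] (l₁ l₂ : List α) (p q : α → Bool)
    (h₁ : l₁.Nodup) (h₂ : l₂.Nodup)
    (h : ∀ x, (x ∈ l₁ ∧ p x = true) ↔ (x ∈ l₂ ∧ q x = true)) :
    l₁.countP p = l₂.countP q := by
  rw [List.countP_eq_length_filter, List.countP_eq_length_filter]
  exact ((List.perm_ext_iff_of_nodup (h₁.filter p) (h₂.filter q)).mpr
    (by intro x; simp only [List.mem_filter]; exact h x)).length_eq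

theorem pvGetDCount (k : Int) (items : List (String × PySem.Set String))
    (d : PySem.Dict String Int) (i : String) :
    (items.foldl (fun d p =>
      if k ≤ (p.2.length : Int) then
        p.2.foldl (fun d i => d.modify i 0 (· + 1)) d
      else d) d).getD i 0
    = d.getD i 0 + (items.map (fun p => if k ≤ (p.2.length : Int) then (p.2.count i : Int) else 0)).sum := by
  induction items generalizing d with
  | nil => simp
  | cons p t ih =>
    simp only [List.foldl_cons, ih, List.map_cons, List.sum_cons]
    by_cases hk : k ≤ (p.2.length : Int)
    · rw [if_pos hk, if_pos hk, PySem.Dict.getD_foldl_modify_add_one]; ring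
    · rw [if_neg hk, if_neg hk]; ring

theorem pvMemGroup (L : List (String × String)) (a b : String) :
    a ∈ PySem.Set.ofList ((L.filter (fun p => p.2 == b)).map Prod.fst) ↔ (a, b) ∈ L := by
  rw [PySem.Set.mem_ofList]
  simp only [List.mem_map, List.mem_filter, beq_iff_eq]
  constructor
  · rintro ⟨⟨x, y⟩, ⟨hm, rfl⟩, rfl⟩; exact hm
  · intro h; exact ⟨(a, b), ⟨h, rfl⟩, rfl⟩

theorem pvMemGroupSnd (L : List (String × String)) (i b : String) :
    b ∈ PySem.Set.ofList ((L.filter (fun p => p.1 == i)).map Prod.snd) ↔ (i, b) ∈ L := by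
  rw [PySem.Set.mem_ofList]
  simp only [List.mem_map, List.mem_filter, beq_iff_eq]
  constructor
  · rintro ⟨⟨x, y⟩, ⟨hm, rfl⟩, rfl⟩; exact hm
  · intro h; exact ⟨(i, b), ⟨h, rfl⟩, rfl⟩

theorem pvGroupLen (L : List (String × String)) (b : String) :
    (PySem.Set.ofList ((L.filter (fun p => p.2 == b)).map Prod.fst)).length
    = ((PySem.Set.ofList L).map Prod.snd).count b := by
  rw [List.count_eq_countP, List.countP_map, List.countP_eq_length_filter]
  have hnodup : (((PySem.Set.ofList L).filter (fun p => p.2 == b)).map Prod.fst).Nodup := by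
    apply List.Nodup.map_on
    · rintro ⟨x, y⟩ hx ⟨x', y'⟩ hx' (h : x = x')
      have hy : y = b := by simpa using (List.mem_filter.mp hx).2
      have hy' : y' = b := by simpa using (List.mem_filter.mp hx').2
      simp [h, hy, hy']
    · exact (PySem.Set.nodup_ofList L).filter _
  have hperm : (PySem.Set.ofList ((L.filter (fun p => p.2 == b)).map Prod.fst)).Perm
      (((PySem.Set.ofList L).filter (fun p => p.2 == b)).map Prod.fst) := by
    rw [List.perm_ext_iff_of_nodup (PySem.Set.nodup_ofList _) hnodup]
    intro a
    rw [pvMemGroup]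
    simp only [List.mem_map, List.mem_filter, beq_iff_eq]
    constructor
    · intro h; exact ⟨(a, b), ⟨(PySem.Set.mem_ofList L _).mpr h, rfl⟩, rfl⟩
    · rintro ⟨⟨x, y⟩, ⟨hm, rfl⟩, rfl⟩; exact (PySem.Set.mem_ofList L _).mp hm
  rw [hperm.length_eq, List.length_map]
  rfl

theorem pvRecvGetD (P : List (String × String)) (d : PySem.Dict String Int) (b : String) :
    (P.foldl (fun d p => d.insert p.2 (d.getD p.2 0 + 1)) d).getD b 0
    = d.getD b 0 + ((P.map Prod.snd).count b : Int) := by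
  induction P generalizing d with
  | nil => simp
  | cons p t ih =>
    simp only [List.foldl_cons, ih, List.map_cons]
    rw [PySem.Dict.getD_insert]
    by_cases hb : b = p.2
    · subst hb; rw [if_pos rfl, List.count_cons_self]; push_cast; ring
    · rw [if_neg hb]; simp [Ne.symm hb]

theorem pvRecvKeys (P : List (String × String)) :
    (P.foldl (fun d p => d.insert p.2 (d.getD p.2 0 + 1)) (PySem.Dict.empty : PySem.Dict String Int)).keys
    = PySem.Set.ofList (P.map Prod.snd) := by
  rw [PySem.Dict.keys_foldl_insert_key P Prod.snd (fun d x => d.getD x.2 0 + 1),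
    PySem.Dict.keys_empty, PySem.Set.update_nil_left]

theorem pvMemSusGen (d : PySem.Dict String Int) (hnd : d.keys.Nodup) (k : Int) (b : String) :
    b ∈ PySem.Set.ofList ((d.items.filter (fun p => k ≤ p.2)).map (fun p => p.1))
    ↔ b ∈ d.keys ∧ k ≤ d.getD b 0 := by
  rw [PySem.Set.mem_ofList, PySem.Dict.items_eq_map_keys _ hnd 0]
  simp only [List.mem_map, List.mem_filter, decide_eq_true_eq]
  constructor
  · rintro ⟨c, ⟨⟨a, ha, rfl⟩, hk⟩, rfl⟩; exact ⟨ha, hk⟩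
  · rintro ⟨hc, hk⟩; exact ⟨(b, d.getD b 0), ⟨⟨b, hc, rfl⟩, hk⟩, rfl⟩

theorem pvMemSuspended (P : List (String × String)) (k : Int) (b : String) :
    b ∈ PySem.Set.ofList
      ((((P.foldl (fun d p => d.insert p.2 (d.getD p.2 0 + 1)) (PySem.Dict.empty : PySem.Dict String Int)).items.filter
          (fun p => k ≤ p.2)).map (fun p => p.1)))
    ↔ (b ∈ P.map Prod.snd ∧ k ≤ ((P.map Prod.snd).count b : Int)) := by
  have hnd : (P.foldl (fun d p => d.insert p.2 (d.getD p.2 0 + 1)) (PySem.Dict.empty : PySem.Dict String Int)).keys.Nodup := by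
    rw [pvRecvKeys P]; exact PySem.Set.nodup_ofList _
  rw [pvMemSusGen _ hnd k b, pvRecvKeys P, pvRecvGetD]
  simp [PySem.Set.mem_ofList]

-- the per-id core equality, stated on the parsed pair list L
theorem pvMain (L : List (String × String)) (k : Int) (i : String) :
    ((L.foldl (fun d p => d.insert p.2 (PySem.Set.add (d.getD p.2 PySem.Set.empty) p.1))
        (PySem.Dict.empty : PySem.Dict String (PySem.Set String))).items.foldl
      (fun d p => if k ≤ (p.2.length : Int) then p.2.foldl (fun d i => d.modify i 0 (· + 1)) d else d)
      (PySem.Dict.empty : PySem.Dict String Int)).getD i 0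
    = (((((PySem.Set.ofList L).foldl
          (fun d p => d.insert p.1 (PySem.Set.add (d.getD p.1 PySem.Set.empty) p.2))
          (PySem.Dict.empty : PySem.Dict String (PySem.Set String))).getD i PySem.Set.empty).filter
        (fun b => PySem.Set.contains (PySem.Set.ofList
          (((((PySem.Set.ofList L).foldl (fun d p => d.insert p.2 (d.getD p.2 0 + 1))
              (PySem.Dict.empty : PySem.Dict String Int)).items.filter
              (fun p => k ≤ p.2)).map (fun p => p.1)))) b)).length : Int) := by
  have hndA : ((L.foldl (fun d p => d.insert p.2 (PySem.Set.add (d.getD p.2 PySem.Set.empty) p.1))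
      (PySem.Dict.empty : PySem.Dict String (PySem.Set String)))).keys.Nodup :=
    PySem.Dict.nodup_keys_foldl_insert_key L Prod.snd
      (fun d p => PySem.Set.add (d.getD p.2 PySem.Set.empty) p.1) _ (by simp)
  have hkeysA : ((L.foldl (fun d p => d.insert p.2 (PySem.Set.add (d.getD p.2 PySem.Set.empty) p.1))
      (PySem.Dict.empty : PySem.Dict String (PySem.Set String)))).keys
      = PySem.Set.ofList (L.map Prod.snd) := by
    rw [PySem.Dict.keys_foldl_insert_key L Prod.snd
      (fun d p => PySem.Set.add (d.getD p.2 PySem.Set.empty) p.1),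
      PySem.Dict.keys_empty, PySem.Set.update_nil_left]
  rw [pvGetDCount, PySem.Dict.getD_empty,
    PySem.Dict.items_eq_map_keys _ hndA PySem.Set.empty, List.map_map, hkeysA]
  rw [pvGetDGroup Prod.fst Prod.snd (PySem.Set.ofList L)]
  -- rewrite each A-side getD via pvGetDGroup, then sum → countP
  have hGA : ∀ b : String,
      ((L.foldl (fun d p => d.insert p.2 (PySem.Set.add (d.getD p.2 PySem.Set.empty) p.1))
        (PySem.Dict.empty : PySem.Dict String (PySem.Set String))).getD b PySem.Set.empty)
      = PySem.Set.ofList ((L.filter (fun p => p.2 == b)).map Prod.fst) := by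
    intro b
    rw [pvGetDGroup Prod.snd Prod.fst L, PySem.Dict.getD_empty]; rfl
  have hmapfun : ∀ b ∈ PySem.Set.ofList (L.map Prod.snd),
      ((fun p : String × PySem.Set String =>
          if k ≤ (p.2.length : Int) then (p.2.count i : Int) else 0) ∘
        (fun b => (b, (L.foldl (fun d p => d.insert p.2 (PySem.Set.add (d.getD p.2 PySem.Set.empty) p.1))
          (PySem.Dict.empty : PySem.Dict String (PySem.Set String))).getD b PySem.Set.empty))) b
      = if (decide (k ≤ ((PySem.Set.ofList ((L.filter (fun p => p.2 == b)).map Prod.fst)).length : Int))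
            && decide ((i, b) ∈ L)) then (1 : Int) else 0 := by
    intro b _
    simp only [Function.comp_apply, hGA b]
    by_cases hk : k ≤ ((PySem.Set.ofList ((L.filter (fun p => p.2 == b)).map Prod.fst)).length : Int)
    · rw [if_pos hk]
      by_cases hi : (i, b) ∈ L
      · have him : i ∈ PySem.Set.ofList ((L.filter (fun p => p.2 == b)).map Prod.fst) :=
          (pvMemGroup L i b).mpr hi
        rw [List.count_eq_one_of_mem (PySem.Set.nodup_ofList _) him]
        simp [hk, hi]
      · have him : i ∉ PySem.Set.ofList ((L.filter (fun p => p.2 == b)).map Prod.fst) :=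
          fun h => hi ((pvMemGroup L i b).mp h)
        rw [List.count_eq_zero_of_not_mem him]
        simp [hi]
    · rw [if_neg hk]; simp [hk]
  rw [List.map_congr_left hmapfun, PySem.List.sum_map_ite_one_zero, zero_add]
  have hupd : ((PySem.Dict.empty : PySem.Dict String (PySem.Set String)).getD i PySem.Set.empty).update
      ((List.filter (fun p => p.1 == i) (PySem.Set.ofList L)).map Prod.snd)
      = PySem.Set.ofList ((List.filter (fun p => p.1 == i) (PySem.Set.ofList L)).map Prod.snd) := by
    rw [PySem.Dict.getD_empty]; rfl
  rw [hupd, ← List.countP_eq_length_filter]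
  congr 1
  apply pvCountPEq _ _ _ _ (PySem.Set.nodup_ofList _) (PySem.Set.nodup_ofList _)
  intro b
  simp only [Bool.and_eq_true, decide_eq_true_eq, PySem.Set.contains_iff, pvMemSuspended,
    pvMemGroupSnd, pvGroupLen]
  constructor
  · rintro ⟨hmem, hk, hib⟩
    have hibP := (PySem.Set.mem_ofList L _).mpr hib
    exact ⟨hibP, List.mem_map_of_mem hibP, hk⟩
  · rintro ⟨hibP, hmem, hk⟩
    have hib := (PySem.Set.mem_ofList L _).mp hibP
    exact ⟨(PySem.Set.mem_ofList _ _).mpr (List.mem_map_of_mem hib), hk, hib⟩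

theorem pvFoldA (report : List String) (h : ∀ r ∈ report, (PySem.Str.split₀ r).length = 2)
    (d0 : PySem.Dict String (PySem.Set String)) :
    report.foldl (fun d r =>
      match PySem.Str.split₀ r with
      | [a, b] => d.insert b (PySem.Set.add (d.getD b PySem.Set.empty) a)
      | _ => d) d0
    = (report.map (fun r => ((PySem.Str.split₀ r).getD 0 "", (PySem.Str.split₀ r).getD 1 ""))).foldl
        (fun d p => d.insert p.2 (PySem.Set.add (d.getD p.2 PySem.Set.empty) p.1)) d0 :=
  pvFoldlMatchSplit report h
    (fun d p => d.insert p.2 (PySem.Set.add (d.getD p.2 PySem.Set.empty) p.1)) d0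

theorem pvFoldB (report : List String) (s0 : PySem.Set (String × String)) :
    report.foldl (fun s r => PySem.Set.add s (pvParse2 r)) s0
    = (report.map (fun r => ((PySem.Str.split₀ r).getD 0 "", (PySem.Str.split₀ r).getD 1 ""))).foldl
        (fun s p => PySem.Set.add s p) s0 := by
  rw [List.foldl_map]
  rfl
theorem pvParsedMain (id_list report : List String) (k : Int)
    (hpre : ∀ r ∈ report, (PySem.Str.split₀ r).length = 2) :
    solution id_list report k = solution_alt id_list report k := by
  simp only [solution, solution_alt]
  rw [pvFoldA report hpre, pvFoldB report,
    PySem.List.foldl_append_singleton_eq_map, List.nil_append]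
  have hof : (report.map (fun r => ((PySem.Str.split₀ r).getD 0 "", (PySem.Str.split₀ r).getD 1 ""))).foldl
      (fun s p => PySem.Set.add s p) PySem.Set.empty
      = PySem.Set.ofList (report.map (fun r => ((PySem.Str.split₀ r).getD 0 "", (PySem.Str.split₀ r).getD 1 ""))) := rfl
  rw [hof]
  exact List.map_congr_left (fun i _ => pvMain _ k i)

-- ===== VERDICT (by name: the statement is the Claim_ definition above) =====
theorem solution_spec : Claim_equal_solution := by
  intro id_list report k _ hpre
  exact pvParsedMain id_list report k hpre
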